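-- pv_equiv track=rewrite | github.com/AlexNerru/InvestingHedger | app/portfolios/views.py | get_portfolios_list
-- ===== SOURCE A (Python) =====
-- def get_portfolios_list(portfolios):
--     portfolio_list = []
--     first = 0
--     counter = 0
--     row = 0
--     portfolio_list.append([])
--     for portfolio in portfolios:
--         if first < 2:
--             portfolio_list[0].append(portfolio)
--             first += 1
--         if first == 2:
--             counter = 3
--             first += 1
--             continue
--         if first > 2:
--             if counter == 3:
--                 portfolio_list.append([])
--                 row += 1
--                 counter = 0
--             portfolio_list[row].append(portfolio)
--             counter += 1
--     return portfolio_list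
-- ===== SOURCE B (Python) =====
-- def get_portfolios_list(portfolios):
--     items = list(portfolios)
--     result = [items[:2]]
--     for i in range(2, len(items), 3):
--         result.append(items[i:i+3])
--     return result
-- ===== Notes on version B (the rewrite author's own statement) =====
-- stated objective: simpler
-- what changed: Replaced A's per-element first/counter/row state machine (mutating rows of a growing list of lists) with direct chunk slicing: the first size-2 row is items[:2] and each later size-3 row is items[i:i+3] for i in range(2, len(items), 3).
import Mathlib
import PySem

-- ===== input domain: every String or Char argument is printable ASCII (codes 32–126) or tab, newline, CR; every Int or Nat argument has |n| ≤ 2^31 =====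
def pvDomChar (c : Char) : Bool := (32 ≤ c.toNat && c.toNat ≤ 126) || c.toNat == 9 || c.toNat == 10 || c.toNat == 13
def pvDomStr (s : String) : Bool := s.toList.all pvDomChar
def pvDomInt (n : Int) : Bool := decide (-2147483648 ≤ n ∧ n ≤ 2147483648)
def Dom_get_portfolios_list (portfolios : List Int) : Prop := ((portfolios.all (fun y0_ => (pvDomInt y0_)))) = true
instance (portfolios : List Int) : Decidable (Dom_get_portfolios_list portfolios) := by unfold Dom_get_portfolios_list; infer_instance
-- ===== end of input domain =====

-- B replaces A's per-element first/counter/row state machine by direct slicing: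
-- the first size-2 row, then items[i:i+3] chunks — simpler, same O(n) cost.

-- ===== PORT A =====
-- portfolio_list[i].append(x) on a list of lists
def pvAppendAt : List (List Int) → Nat → Int → List (List Int)
  | [], _, _ => []
  | r :: rs, 0, x => (r ++ [x]) :: rs
  | r :: rs, i+1, x => r :: pvAppendAt rs i x

-- the for-loop of A, state = (portfolio_list, first, counter, row); Python's sequential
-- ifs with `continue` threaded explicitly (branches in source order)
def get_portfolios_list_go : List Int → List (List Int) → Nat → Nat → Nat → List (List Int)
  | [], pl, _, _, _ => pl
  | p :: rest, pl, first, counter, row =>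
    if first < 2 then
      -- appended to row 0, first += 1; then the `if first == 2: … continue`
      if first + 1 = 2 then
        get_portfolios_list_go rest (pvAppendAt pl 0 p) (first + 1 + 1) 3 row
      else
        get_portfolios_list_go rest (pvAppendAt pl 0 p) (first + 1) counter row
    else
      if first = 2 then
        get_portfolios_list_go rest pl (first + 1) 3 row
      else if first > 2 then
        if counter = 3 then
          get_portfolios_list_go rest (pvAppendAt (pl ++ [[]]) (row + 1) p) first 1 (row + 1)
        else
          get_portfolios_list_go rest (pvAppendAt pl row p) first (counter + 1) row
      else
        get_portfolios_list_go rest pl first counter row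

def get_portfolios_list (portfolios : List Int) : List (List Int) :=
  get_portfolios_list_go portfolios [[]] 0 0 0

-- ===== PORT B =====
def get_portfolios_list_alt (portfolios : List Int) : List (List Int) :=
  let items := portfolios
  let result := [PySem.List.slice items none (some 2)]
  (PySem.List.pyRange 2 (items.length : Int) 3).foldl
    (fun acc i => acc ++ [PySem.List.slice items (some i) (some (i + 3))]) result

-- ===== PRECONDITION & SPEC =====
def Spec_get_portfolios_list (portfolios : List Int) (out : List (List Int)) : Prop := out = get_portfolios_list_alt portfolios
instance (portfolios : List Int) (out : List (List Int)) : Decidable (Spec_get_portfolios_list portfolios out) := by unfold Spec_get_portfolios_list; infer_instance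

-- ===== CLAIM (what is proved, stated in full; the proofs are below) =====
def Claim_equal_get_portfolios_list : Prop := ∀ (portfolios : List Int), Dom_get_portfolios_list portfolios → Spec_get_portfolios_list portfolios (get_portfolios_list portfolios)

-- ===== LEMMAS AND PROOFS =====

-- common reference shape: chunks of 3
def chunks3 : List Int → List (List Int)
  | [] => []
  | [x] => [[x]]
  | [x, y] => [[x, y]]
  | x :: y :: z :: rest => [x, y, z] :: chunks3 rest

lemma chunks3_cons (x : Int) (xs : List Int) :
    chunks3 (x :: xs) = (x :: xs.take 2) :: chunks3 (xs.drop 2) := by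
  match xs with
  | [] => rfl
  | [y] => rfl
  | y :: z :: rest => rfl

lemma pvAppendAt_last (pl : List (List Int)) (cur : List Int) (x : Int) :
    pvAppendAt (pl ++ [cur]) pl.length x = pl ++ [cur ++ [x]] := by
  induction pl with
  | nil => simp [pvAppendAt]
  | cons r rs ih => simpa [pvAppendAt] using ih

-- A's loop, tracking current row `cur` at index pl.length with 1 ≤ c ≤ 3 items accounted
def fill : List Int → List Int → Nat → List (List Int)
  | [], cur, _ => [cur]
  | x :: xs, cur, c => if c = 3 then cur :: fill xs [x] 1 else fill xs (cur ++ [x]) (c + 1)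

lemma go_steady (ys : List Int) : ∀ (pl : List (List Int)) (cur : List Int) (c : Nat),
    1 ≤ c → c ≤ 3 →
    get_portfolios_list_go ys (pl ++ [cur]) 3 c pl.length = pl ++ fill ys cur c := by
  induction ys with
  | nil => intro pl cur c _ _; simp [get_portfolios_list_go, fill]
  | cons x xs ih =>
    intro pl cur c h1 h3
    by_cases hc : c = 3
    · subst hc
      simp only [get_portfolios_list_go, fill]
      norm_num
      rw [show pl.length + 1 = (pl ++ [cur]).length by simp,
        show pl ++ [cur, []] = (pl ++ [cur]) ++ [([] : List Int)] by simp,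
        pvAppendAt_last, show ([] : List Int) ++ [x] = [x] by simp,
        ih (pl ++ [cur]) [x] 1 (by omega) (by omega)]
      simp
    · simp only [get_portfolios_list_go, fill, if_neg hc]
      norm_num
      rw [pvAppendAt_last, ih pl (cur ++ [x]) (c + 1) (by omega) (by omega)]

lemma fill_eq (xs : List Int) : ∀ (cur : List Int) (c : Nat), 1 ≤ c → c ≤ 3 →
    fill xs cur c = (cur ++ xs.take (3 - c)) :: chunks3 (xs.drop (3 - c)) := by
  induction xs with
  | nil => intro cur c _ _; simp [fill, chunks3]
  | cons x xs ih =>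
    intro cur c h1 h3
    by_cases hc : c = 3
    · subst hc
      simp only [fill, Nat.sub_self, List.take_zero, List.append_nil, List.drop_zero]
      rw [ih [x] 1 (by omega) (by omega), chunks3_cons]
      simp
    · have hc' : 3 - c = (3 - (c + 1)) + 1 := by omega
      simp only [fill, if_neg hc]
      rw [ih (cur ++ [x]) (c + 1) (by omega) (by omega), hc']
      simp

lemma a_eq (xs : List Int) :
    get_portfolios_list xs = xs.take 2 :: chunks3 (xs.drop 2) := by
  match xs with
  | [] => simp [get_portfolios_list, get_portfolios_list_go, chunks3]
  | [a] => simp [get_portfolios_list, get_portfolios_list_go, pvAppendAt, chunks3]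
  | a :: b :: ys =>
    show get_portfolios_list_go (a :: b :: ys) [[]] 0 0 0 = _
    simp only [get_portfolios_list_go, pvAppendAt]
    norm_num
    have h := go_steady ys [] [a, b] 3 (by omega) (by omega)
    simp only [List.nil_append, List.length_nil] at h
    rw [h, fill_eq ys [a, b] 3 (by omega) (by omega)]
    simp

lemma pyRange3_nil (a b : Int) (h : b ≤ a) : PySem.List.pyRange a b 3 = [] := by
  rw [PySem.List.pyRange_of_pos a b (by norm_num)]
  simp [if_neg (not_lt.2 h)]

lemma pyRange3_cons (a b : Int) (h : a < b) :
    PySem.List.pyRange a b 3 = a :: PySem.List.pyRange (a + 3) b 3 := by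
  rw [PySem.List.pyRange_of_pos a b (by norm_num), PySem.List.pyRange_of_pos (a+3) b (by norm_num)]
  rw [if_pos h]
  have hcount : ((b - a + 3 - 1) / 3).toNat
      = (if a + 3 < b then ((b - (a + 3) + 3 - 1) / 3).toNat else 0) + 1 := by
    split_ifs with h2 <;> omega
  rw [hcount, List.range_succ_eq_map]
  simp only [List.map_cons, List.map_map, Nat.cast_zero, mul_zero, add_zero]
  refine congrArg _ (List.map_congr_left ?_)
  intro k _
  simp [Function.comp, Nat.succ_eq_add_one]
  ring

lemma b_loop (xs : List Int) : ∀ (n : Nat), ∀ (i : Nat) (acc : List (List Int)),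
    xs.length - i = n →
    (PySem.List.pyRange (i : Int) (xs.length : Int) 3).foldl
      (fun acc j => acc ++ [PySem.List.slice xs (some j) (some (j + 3))]) acc
    = acc ++ chunks3 (xs.drop i) := by
  intro n
  induction n using Nat.strong_induction_on with
  | _ n ihn =>
    intro i acc hn
    by_cases hi : xs.length ≤ i
    · rw [pyRange3_nil _ _ (by exact_mod_cast hi)]
      simp [List.drop_of_length_le hi, chunks3]
    · replace hi := lt_of_not_ge hi
      rw [pyRange3_cons _ _ (by exact_mod_cast hi)]
      simp only [List.foldl_cons]
      have hslice : PySem.List.slice xs (some (i : Int)) (some ((i : Int) + 3)) = (xs.drop i).take 3 := by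
        rw [show ((i : Int) + 3) = ((i : Int) + ((3 : Nat) : Int)) by norm_num]
        exact PySem.List.slice_natCast_add xs i 3
      rw [hslice]
      have h3 : (i : Int) + 3 = ((i + 3 : Nat) : Int) := by push_cast; ring
      rw [h3, ihn (xs.length - (i + 3)) (by omega) (i + 3) _ rfl]
      obtain ⟨y, ys, hys⟩ : ∃ y ys, xs.drop i = y :: ys := by
        cases h : xs.drop i with
        | nil => exact absurd (List.drop_eq_nil_iff.1 h) (by omega)
        | cons y ys => exact ⟨y, ys, rfl⟩
      rw [show xs.drop (i + 3) = (xs.drop i).drop 3 by rw [List.drop_drop, Nat.add_comm], hys,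
        chunks3_cons]
      simp

lemma b_eq (xs : List Int) :
    get_portfolios_list_alt xs = xs.take 2 :: chunks3 (xs.drop 2) := by
  unfold get_portfolios_list_alt
  simp only []
  rw [show (2 : Int) = ((2 : Nat) : Int) by norm_num,
    b_loop xs (xs.length - 2) 2 _ rfl,
    PySem.List.slice_to_natCast]
  simp

-- ===== VERDICT (by name: the statement is the Claim_ definition above) =====
theorem get_portfolios_list_spec : Claim_equal_get_portfolios_list := by
  intro xs _
  unfold Spec_get_portfolios_list
  rw [a_eq, b_eq]
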